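-- pv_equiv track=rewrite | github.com/KoKoLates/ddrive-robot-notes | example.py | square_path_generator
-- ===== SOURCE A (Python) =====
-- def square_path_generator(
--     x: int, y: int, border: int, step: int = 20
-- ) -> list[tuple[int, int]]:
--     waypoints: list[tuple[int, int]] = []
--
--     waypoints += [(i, y) for i in range(x, x + border, step)]
--     waypoints += [(x + border, j) for j in range(y, y + border, step)]
--     waypoints += [(i, y + border) for i in range(x + border, x, -step)]
--     waypoints += [(x, j) for j in range(y + border, y, -step)]
--
--     return waypoints
-- ===== SOURCE B (Python) =====
-- def square_path_generator(
--     x: int, y: int, border: int, step: int = 20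
-- ) -> list[tuple[int, int]]:
--     # Closed form: every edge of the square contributes exactly
--     # n = max(0, ceil(border / step)) points, so the whole path is one
--     # flat loop over a global index t in [0, 4n), decoded arithmetically.
--     n = max(0, -((-border) // step))
--     pts: list[tuple[int, int]] = []
--     for t in range(4 * n):
--         e, i = divmod(t, n)
--         d = i * step
--         if e == 0:
--             pts.append((x + d, y))
--         elif e == 1:
--             pts.append((x + border, y + d))
--         elif e == 2:
--             pts.append((x + border - d, y + border))
--         else:
--             pts.append((x, y + border - d))
--     return pts
-- ===== Notes on version B (the rewrite author's own statement) =====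
-- stated objective: alternative
-- what changed: Replaces the four edge-by-edge range comprehensions with a closed-form per-edge point count n = max(0, ceil(border/step)) (all four edges provably have the same count) and a single flat loop over a global index 0..4n that is decoded arithmetically (divmod) into a waypoint.
import Mathlib
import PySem

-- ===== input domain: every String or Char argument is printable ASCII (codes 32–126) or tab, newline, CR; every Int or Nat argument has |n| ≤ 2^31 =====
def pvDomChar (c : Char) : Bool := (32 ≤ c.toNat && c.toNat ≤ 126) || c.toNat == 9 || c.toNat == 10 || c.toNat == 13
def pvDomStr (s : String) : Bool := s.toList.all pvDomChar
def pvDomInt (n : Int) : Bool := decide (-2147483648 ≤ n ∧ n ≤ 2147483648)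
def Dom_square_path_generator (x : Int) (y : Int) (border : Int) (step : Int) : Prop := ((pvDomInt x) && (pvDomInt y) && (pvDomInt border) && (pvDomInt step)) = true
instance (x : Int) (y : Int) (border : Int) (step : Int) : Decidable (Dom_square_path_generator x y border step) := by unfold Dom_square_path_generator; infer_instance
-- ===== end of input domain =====

-- B replaces A's four edge-by-edge range comprehensions with a closed-form point
-- count n = max(0, ceil(border/step)) and ONE flat loop over a global index 0..4n
-- decoded arithmetically into a waypoint (objective: alternative).

-- ===== PORT A =====
def square_path_generator (x : Int) (y : Int) (border : Int) (step : Int) : List (Int × Int) :=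
  let waypoints : List (Int × Int) := []
  let waypoints := waypoints ++ (PySem.List.pyRange x (x + border) step).map (fun i => (i, y))
  let waypoints := waypoints ++ (PySem.List.pyRange y (y + border) step).map (fun j => (x + border, j))
  let waypoints := waypoints ++ (PySem.List.pyRange (x + border) x (-step)).map (fun i => (i, y + border))
  let waypoints := waypoints ++ (PySem.List.pyRange (y + border) y (-step)).map (fun j => (x, j))
  waypoints

-- ===== PORT B =====
-- divmod(t, n) in Source B only ever runs with n > 0 (the loop is empty when n = 0),
-- so the total PySem.Int.floordiv/mod are exact here.
def square_path_generator_alt (x : Int) (y : Int) (border : Int) (step : Int) : List (Int × Int) :=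
  let n : Int := max 0 (-(PySem.Int.floordiv (-border) step))
  (PySem.List.pyRange 0 (4 * n) 1).foldl
    (fun pts t =>
      let e := PySem.Int.floordiv t n
      let i := PySem.Int.mod t n
      let d := i * step
      pts ++ [if e = 0 then (x + d, y)
              else if e = 1 then (x + border, y + d)
              else if e = 2 then (x + border - d, y + border)
              else (x, y + border - d)])
    []

-- ===== PRECONDITION & SPEC =====
-- step = 0 makes A's range(...) raise ValueError (and B's // raise ZeroDivisionError); excluded.
def Pre_square_path_generator (x : Int) (y : Int) (border : Int) (step : Int) : Prop := step ≠ 0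
instance (x : Int) (y : Int) (border : Int) (step : Int) : Decidable (Pre_square_path_generator x y border step) := by unfold Pre_square_path_generator; infer_instance
def pvWitness_square_path_generator : Int × Int × Int × Int := (0, 0, 50, 20)

def Spec_square_path_generator (x : Int) (y : Int) (border : Int) (step : Int) (out : List (Int × Int)) : Prop := out = square_path_generator_alt x y border step
instance (x : Int) (y : Int) (border : Int) (step : Int) (out : List (Int × Int)) : Decidable (Spec_square_path_generator x y border step out) := by unfold Spec_square_path_generator; infer_instance

-- ===== CLAIM (what is proved, stated in full; the proofs are below) =====
def Claim_equal_square_path_generator : Prop := ∀ (x : Int) (y : Int) (border : Int) (step : Int), Dom_square_path_generator x y border step → Pre_square_path_generator x y border step → Spec_square_path_generator x y border step (square_path_generator x y border step)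

-- ===== LEMMAS AND PROOFS =====

-- the element count of range(a, b, s) as a function of b - a and s (mirrors pyRange's count)
def pvCnt (d s : Int) : Nat :=
  if 0 < s then (if 0 < d then ((d + s - 1) / s).toNat else 0)
  else (if d < 0 then ((-d + -s - 1) / -s).toNat else 0)

theorem pv_pyRange_eq_cnt (a b s : Int) (hs : s ≠ 0) :
    PySem.List.pyRange a b s = (List.range (pvCnt (b - a) s)).map (fun k : Nat => a + s * (k : Int)) := by
  unfold PySem.List.pyRange pvCnt
  simp only [hs, if_false,
    show (a < b) = (0 < b - a) from propext (by omega),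
    show (b < a) = (b - a < 0) from propext (by omega),
    show a - b = -(b - a) from by ring]

theorem pv_cnt_neg_neg (d s : Int) (hs : s ≠ 0) : pvCnt (-d) (-s) = pvCnt d s := by
  unfold pvCnt
  by_cases h1 : 0 < s
  · simp only [show ¬ (0 : Int) < -s by omega, if_false, h1, if_true,
      show (-d < 0) = (0 < d) from propext (by omega), neg_neg]
  · simp only [show (0 : Int) < -s by omega, if_true, h1, if_false,
      show (0 < -d) = (d < 0) from propext (by omega), neg_neg]

-- closed form: the count is max(0, ceil(d/s)) = max(0, -((-d)//s)), positive step
theorem pv_cnt_closed_pos (d s : Int) (hpos : 0 < s) :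
    (pvCnt d s : Int) = max 0 (-(PySem.Int.floordiv (-d) s)) := by
  set q : Int := -(PySem.Int.floordiv (-d) s) with hq
  have hbr : (q - 1) * s < d ∧ d ≤ q * s :=
    (PySem.Int.neg_floordiv_neg_eq_iff_of_pos hpos).mp rfl
  unfold pvCnt
  simp only [hpos, if_true]
  by_cases h2 : 0 < d
  · simp only [h2, if_true]
    have hqpos : 0 < q := by nlinarith [hbr.1, hbr.2]
    have hdiv : PySem.Int.floordiv (d + s - 1) s = q := by
      rw [PySem.Int.floordiv_eq_iff_of_pos hpos]
      constructor <;> nlinarith [hbr.1, hbr.2]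
    rw [PySem.Int.floordiv_eq_ediv_of_pos hpos] at hdiv
    rw [hdiv]
    omega
  · simp only [h2, if_false]
    have hqle : q ≤ 0 := by nlinarith [hbr.1, hbr.2]
    omega

-- closed form for any nonzero step
theorem pv_cnt_closed (d s : Int) (hs : s ≠ 0) :
    (pvCnt d s : Int) = max 0 (-(PySem.Int.floordiv (-d) s)) := by
  rcases lt_or_gt_of_ne hs with hneg | hpos
  · rw [← pv_cnt_neg_neg d s hs]
    have h1 := pv_cnt_closed_pos (-d) (-s) (by omega)
    have h2 : PySem.Int.floordiv d (-s) = PySem.Int.floordiv (-d) s := by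
      simpa using PySem.Int.floordiv_neg_neg (-d) s
    simpa [h2] using h1
  · exact pv_cnt_closed_pos d s hpos

-- decoding the flat index: for 0 ≤ k < n, (e*n + k) // n = e and (e*n + k) % n = k
theorem pv_decode (e n : Int) (k : Nat) (hn : 0 < n) (hk : (k : Int) < n) :
    PySem.Int.floordiv (e * n + k) n = e ∧ PySem.Int.mod (e * n + k) n = k := by
  have hd : PySem.Int.floordiv (e * n + k) n = e := by
    rw [PySem.Int.floordiv_eq_iff_of_pos hn]
    constructor <;> nlinarith [Int.natCast_nonneg k]
  refine ⟨hd, ?_⟩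
  have h := PySem.Int.floordiv_mul_add_mod (e * n + k) n
  rw [hd] at h
  omega

-- ===== VERDICT (by name: the statement is the Claim_ definition above) =====
theorem square_path_generator_spec : Claim_equal_square_path_generator := by
  intro x y border step _ hs
  have hs' : step ≠ 0 := hs
  unfold Spec_square_path_generator square_path_generator square_path_generator_alt
  dsimp only
  set N : Nat := pvCnt border step with hN
  have hcnt : ((N : Int)) = max 0 (-(PySem.Int.floordiv (-border) step)) :=
    pv_cnt_closed border step hs'
  set n : Int := max 0 (-(PySem.Int.floordiv (-border) step)) with hn
  have e1 : PySem.List.pyRange x (x + border) step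
      = (List.range N).map (fun k : Nat => x + step * (k : Int)) := by
    simpa using pv_pyRange_eq_cnt x (x + border) step hs'
  have e2 : PySem.List.pyRange y (y + border) step
      = (List.range N).map (fun k : Nat => y + step * (k : Int)) := by
    simpa using pv_pyRange_eq_cnt y (y + border) step hs'
  have e3 : PySem.List.pyRange (x + border) x (-step)
      = (List.range N).map (fun k : Nat => (x + border) + (-step) * (k : Int)) := by
    have h := pv_pyRange_eq_cnt (x + border) x (-step) (by omega)
    rw [h, show x - (x + border) = -border by ring, pv_cnt_neg_neg border step hs']
  have e4 : PySem.List.pyRange (y + border) y (-step)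
      = (List.range N).map (fun k : Nat => (y + border) + (-step) * (k : Int)) := by
    have h := pv_pyRange_eq_cnt (y + border) y (-step) (by omega)
    rw [h, show y - (y + border) = -border by ring, pv_cnt_neg_neg border step hs']
  have hnN : (4 * n - 0).toNat = 4 * N := by omega
  have eB : PySem.List.pyRange 0 (4 * n) 1 = (List.range (4 * N)).map (fun k : Nat => (k : Int)) := by
    rw [PySem.List.pyRange_one, hnN]
    simp
  rw [List.nil_append, e1, e2, e3, e4, eB, PySem.List.foldl_append_singleton_eq_map,
    List.nil_append]
  have hsplit : List.range (4 * N)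
      = List.range N ++ ((List.range N).map (fun k => N + k)
        ++ ((List.range N).map (fun k => N + N + k)
        ++ (List.range N).map (fun k => N + (N + N) + k))) := by
    rw [show 4 * N = N + (N + (N + N)) by omega, List.range_add, List.range_add, List.range_add]
    simp [List.map_append, List.map_map]
  rw [hsplit]
  simp only [List.map_append, List.map_map, Function.comp_def, List.append_assoc]
  rcases Nat.eq_zero_or_pos N with h0 | hNpos
  · simp [h0]
  have hnpos : 0 < n := by omega
  congr 1
  · apply List.map_congr_left
    intro k hk
    have hk' : (k : Int) < n := by have := List.mem_range.mp hk; omega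
    have hdec := pv_decode 0 n k hnpos hk'
    rw [show (0 : Int) * n + (k : Int) = (k : Int) by ring] at hdec
    simp only [hdec.1, hdec.2]
    norm_num [Prod.ext_iff]
    ring
  congr 1
  · apply List.map_congr_left
    intro k hk
    have hk' : (k : Int) < n := by have := List.mem_range.mp hk; omega
    have hdec := pv_decode 1 n k hnpos hk'
    have hcast : ((N + k : Nat) : Int) = 1 * n + (k : Int) := by push_cast; omega
    simp only [hcast, hdec.1, hdec.2]
    norm_num [Prod.ext_iff]
    ring
  congr 1
  · apply List.map_congr_left
    intro k hk
    have hk' : (k : Int) < n := by have := List.mem_range.mp hk; omega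
    have hdec := pv_decode 2 n k hnpos hk'
    have hcast : ((N + N + k : Nat) : Int) = 2 * n + (k : Int) := by push_cast; omega
    simp only [hcast, hdec.1, hdec.2]
    norm_num [Prod.ext_iff]
    ring
  · apply List.map_congr_left
    intro k hk
    have hk' : (k : Int) < n := by have := List.mem_range.mp hk; omega
    have hdec := pv_decode 3 n k hnpos hk'
    have hcast : ((N + (N + N) + k : Nat) : Int) = 3 * n + (k : Int) := by push_cast; omega
    simp only [hcast, hdec.1, hdec.2]
    norm_num [Prod.ext_iff]
    ring
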